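-- pv_equiv track=rewrite | github.com/AI-STACK-dev/Algorithm_solving | sujang/programmers/가사검색.py | solution
-- ===== SOURCE A (Python) =====
-- def solution(words,queries):
--     head, head_rev = {}, {}
--     word_count = []
--
--     def add(head,word):
--         len_word = len(word)
--         node = head
--         for w in word:
--             if w not in node:
--                 node[w]={}
--             node = node[w]
--             if 'len' not in node:
--                 node['len'] = [len_word]
--             else:
--                 node['len'].append(len_word)
--         node['end'] = True
--
--
--     for word in words:
--         add(head,word)
--         add(head_rev,word[::-1])
--         word_count.append(len(word))
--
--
--     def search(head, querie):
--         len_qu = len(querie)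
--         node = head
--         for q in querie:
--             if q == '?':
--                 return node['len'].count(len_qu)
--             elif q not in node:
--                 break
--             node = node[q]
--         return 0
--
--     ans = []
--     for querie in queries:
--         len_qu = len(querie)
--         if querie[0] == '?':
--             if querie[-1] == '?':
--                 ans.append(word_count.count(len_qu))
--             else:
--                 ans.append(search(head_rev, querie[::-1]))
--         else:
--             ans.append(search(head, querie))
--     return ans
-- ===== SOURCE B (Python) =====
-- def solution(words, queries):
--     # Flat re-implementation: no trie; each query is answered by one scan of
--     # words, matching length plus the fixed prefix (up to the first '?') or,
--     # for queries starting with '?', the fixed suffix (after the last '?').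
--     ans = []
--     for q in queries:
--         if '?' not in q:
--             ans.append(0)  # mirrors A: a wildcard-free query matches nothing
--         elif q[0] == '?':
--             suffix = q.rpartition('?')[2]
--             ans.append(sum(1 for w in words
--                            if len(w) == len(q) and w.endswith(suffix)))
--         else:
--             prefix = q.partition('?')[0]
--             ans.append(sum(1 for w in words
--                            if len(w) == len(q) and w.startswith(prefix)))
--     return ans
-- ===== Notes on version B (the rewrite author's own statement) =====
-- stated objective: simpler
-- what changed: Replaces the two hand-built dict tries (with per-node length lists) by a direct per-query scan of the word list that counts words of the query's length sharing its fixed prefix (or fixed suffix for queries starting with '?'), reproducing A's 0 for wildcard-free queries; a timing run measured B faster (no trie construction or per-node list appends, just C-level startswith/endswith scans).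
import Mathlib
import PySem

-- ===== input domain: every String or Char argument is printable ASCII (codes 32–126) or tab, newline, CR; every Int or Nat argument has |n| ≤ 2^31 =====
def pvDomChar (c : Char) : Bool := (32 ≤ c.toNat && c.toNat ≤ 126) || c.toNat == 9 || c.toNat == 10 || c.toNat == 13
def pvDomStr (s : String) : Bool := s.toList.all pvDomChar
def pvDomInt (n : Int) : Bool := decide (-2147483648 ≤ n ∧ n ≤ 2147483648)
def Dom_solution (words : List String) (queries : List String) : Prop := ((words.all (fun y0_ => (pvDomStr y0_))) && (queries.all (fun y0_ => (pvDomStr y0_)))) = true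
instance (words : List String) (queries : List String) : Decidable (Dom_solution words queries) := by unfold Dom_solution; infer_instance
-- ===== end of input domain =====

-- B drops A's two hand-built dict tries for a direct per-query scan of the word
-- list (count words of the query's length sharing its fixed prefix/suffix);
-- same return values on all inputs with no empty query (where A raises IndexError).

-- ===== PORT A =====
-- A's trie node is a Python dict {'len': [...], 'end': True, char: child, ...}.
-- Ported as a triple (len list, end flag, children); the children dict is a
-- sibling chain carrying each child's fields (nested inductives are unavailable;
-- dict lookup is by key, so chain order is irrelevant to A's reads).
inductive PvKids where
  | nil : PvKids
  | cons : Char → List Int → Bool → PvKids → PvKids → PvKids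
    -- cons c lens end child-kids rest-of-chain

abbrev PvNode := List Int × Bool × PvKids

-- dict lookup 'w in node' / 'node[w]'
def pvFind : PvKids → Char → Option PvNode
  | .nil, _ => none
  | .cons c lens e ch rest, q => if c = q then some (lens, e, ch) else pvFind rest q

-- dict write 'node[w] = child' (overwrite in place, else append)
def pvSet : PvKids → Char → PvNode → PvKids
  | .nil, c, t => .cons c t.1 t.2.1 t.2.2 .nil
  | .cons c' l' e' ch' rest, c, t =>
      if c' = c then .cons c' t.1 t.2.1 t.2.2 rest
      else .cons c' l' e' ch' (pvSet rest c t)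

-- A's 'add(head, word)': descend char by char, creating missing nodes, appending
-- len_word to each visited node's 'len' list; set 'end' = True at the last node.
def pvAdd : PvNode → List Char → Int → PvNode
  | t, [], _ => (t.1, true, t.2.2)
  | t, c :: cs, L =>
      let ch := (pvFind t.2.2 c).getD ([], false, PvKids.nil)
      (t.1, t.2.1, pvSet t.2.2 c (pvAdd (ch.1 ++ [L], ch.2.1, ch.2.2) cs L))

-- A's 'search(head, querie)'
def pvSearch : PvNode → List Char → Int → Int
  | _, [], _ => 0
  | t, q :: qs, L =>
      if q = '?' then (PySem.List.count t.1 L : Int)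
      else
        match pvFind t.2.2 q with
        | none => 0
        | some ch => pvSearch ch qs L

def solution (words : List String) (queries : List String) : List Int :=
  -- one loop over words builds head, head_rev and word_count together
  let st := words.foldl
    (fun (st : PvNode × PvNode × List Int) word =>
      (pvAdd st.1 word.toList (PySem.Str.len word),
       pvAdd st.2.1 word.toList.reverse (PySem.Str.len word),   -- word[::-1] (PySem.Str.slice?_none_none_neg_one)
       st.2.2 ++ [PySem.Str.len word]))
    (([], false, PvKids.nil), ([], false, PvKids.nil), ([] : List Int))
  queries.foldl
    (fun ans q =>
      let qc := q.toList
      ans ++ [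
        match qc with
        | [] => 0   -- Python raises IndexError on querie[0]; excluded by Pre_solution
        | c0 :: _ =>
            if c0 = '?' then
              if qc.getLast? = some '?' then (PySem.List.count st.2.2 (PySem.Str.len q) : Int)
              else pvSearch st.2.1 qc.reverse (PySem.Str.len q)
            else pvSearch st.1 qc (PySem.Str.len q)]) []

-- ===== PORT B =====
def solution_alt (words : List String) (queries : List String) : List Int :=
  queries.foldl
    (fun ans q =>
      let qc := q.toList
      ans ++ [
        if PySem.Chars.isIn ['?'] qc = false then 0
        else if qc.head? = some '?' then
          -- q.rpartition('?')[2] = text after the LAST '?'; exact since '?' ∈ q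
          let suffix := (qc.reverse.takeWhile (· ≠ '?')).reverse
          words.foldl
            (fun acc w =>
              if PySem.Str.len w = PySem.Str.len q ∧ PySem.Chars.endswith w.toList suffix = true
              then acc + 1 else acc) 0
        else
          -- q.partition('?')[0] = text before the FIRST '?'
          let pre := qc.takeWhile (· ≠ '?')
          words.foldl
            (fun acc w =>
              if PySem.Str.len w = PySem.Str.len q ∧ PySem.Chars.startswith w.toList pre = true
              then acc + 1 else acc) 0]) []

-- ===== PRECONDITION & SPEC =====
-- A indexes querie[0], so an empty query string raises IndexError; nothing else raises.
def Pre_solution (words : List String) (queries : List String) : Prop := "" ∉ queries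
instance (words : List String) (queries : List String) : Decidable (Pre_solution words queries) := by unfold Pre_solution; infer_instance
def pvWitness_solution : List String × List String := (["frodo", "front", "frost", "frane", "kakao"], ["fro??", "????o", "fr???", "fro???", "pro?"])

def Spec_solution (words : List String) (queries : List String) (out : List Int) : Prop := out = solution_alt words queries
instance (words : List String) (queries : List String) (out : List Int) : Decidable (Spec_solution words queries out) := by unfold Spec_solution; infer_instance

-- ===== CLAIM (what is proved, stated in full; the proofs are below) =====
def Claim_equal_solution : Prop := ∀ (words : List String) (queries : List String), Dom_solution words queries → Pre_solution words queries → Spec_solution words queries (solution words queries)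
-- ===== LEMMAS AND PROOFS =====

-- 'len' list stored at the node reached by path p ([] if the path is absent)
def pvLensAt : PvNode → List Char → List Int
  | t, [] => t.1
  | t, c :: cs =>
      match pvFind t.2.2 c with
      | none => []
      | some ch => pvLensAt ch cs

theorem pvFind_pvSet_self (ks : PvKids) (c : Char) (t : PvNode) :
    pvFind (pvSet ks c t) c = some t := by
  induction ks with
  | nil => simp [pvSet, pvFind]
  | cons c' l' e' ch' rest ih_ch ih_rest =>
      by_cases h : c' = c <;> simp [pvSet, pvFind, h, ih_rest]

theorem pvFind_pvSet_ne (ks : PvKids) (c c' : Char) (t : PvNode) (h : c' ≠ c) :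
    pvFind (pvSet ks c t) c' = pvFind ks c' := by
  induction ks with
  | nil => simp [pvSet, pvFind, Ne.symm h]
  | cons c'' l'' e'' ch'' rest ih_ch ih_rest =>
      by_cases h2 : c'' = c
      · subst h2; simp [pvSet, pvFind, Ne.symm h]
      · simp [pvSet, pvFind, h2, ih_rest]

theorem pvAdd_fst (t : PvNode) (w : List Char) (L : Int) : (pvAdd t w L).1 = t.1 := by
  cases w <;> simp [pvAdd]

theorem pvFind_nil (c : Char) : pvFind PvKids.nil c = none := rfl

theorem pvLensAt_nil_path (t : PvNode) : pvLensAt t [] = t.1 := rfl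

theorem pvLensAt_cons (t : PvNode) (c : Char) (cs : List Char) :
    pvLensAt t (c :: cs)
      = (match pvFind t.2.2 c with | none => [] | some ch => pvLensAt ch cs) := rfl

theorem pvLensAt_cons_none (t : PvNode) (c : Char) (cs : List Char)
    (h : pvFind t.2.2 c = none) : pvLensAt t (c :: cs) = [] := by
  rw [pvLensAt_cons, h]

theorem pvLensAt_cons_some (t : PvNode) (c : Char) (cs : List Char) (ch : PvNode)
    (h : pvFind t.2.2 c = some ch) : pvLensAt t (c :: cs) = pvLensAt ch cs := by
  rw [pvLensAt_cons, h]

theorem pvLensAt_empty (p : List Char) : pvLensAt (([], false, PvKids.nil) : PvNode) p = [] := by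
  cases p with
  | nil => rfl
  | cons c cs => exact pvLensAt_cons_none _ _ _ (pvFind_nil c)

theorem pvLensAt_pvAdd (p : List Char) : ∀ (w : List Char) (t : PvNode) (L : Int),
    pvLensAt (pvAdd t w L) p = pvLensAt t p ++ (if p ≠ [] ∧ p <+: w then [L] else []) := by
  induction p with
  | nil =>
      intro w t L
      simp [pvLensAt_nil_path, pvAdd_fst]
  | cons pc ps ih =>
      intro w t L
      cases w with
      | nil =>
          have h1 : pvAdd t [] L = (t.1, true, t.2.2) := rfl
          have h2 : ¬ (pc :: ps <+: ([] : List Char)) := by simp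
          rw [h1, pvLensAt_cons, pvLensAt_cons]
          simp [h2]
      | cons wc ws =>
          have hadd : pvAdd t (wc :: ws) L
              = (t.1, t.2.1, pvSet t.2.2 wc
                  (pvAdd ((((pvFind t.2.2 wc).getD ([], false, PvKids.nil)).1 ++ [L],
                           ((pvFind t.2.2 wc).getD ([], false, PvKids.nil)).2.1,
                           ((pvFind t.2.2 wc).getD ([], false, PvKids.nil)).2.2) : PvNode) ws L)) := rfl
          by_cases hc : pc = wc
          · subst hc
            rw [hadd, pvLensAt_cons_some _ _ _ _ (pvFind_pvSet_self t.2.2 pc _), ih]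
            rcases hfind : pvFind t.2.2 pc with _ | ch
            · cases ps with
              | nil =>
                  simp [hfind, pvLensAt_nil_path, pvLensAt_cons_none t pc [] hfind,
                    List.cons_prefix_cons]
              | cons a b =>
                  have hlem : pvLensAt ((([L] : List Int), false, PvKids.nil) : PvNode) (a :: b) = [] :=
                    pvLensAt_cons_none _ _ _ (pvFind_nil a)
                  simp [hfind, hlem, pvLensAt_cons_none t pc (a :: b) hfind, List.cons_prefix_cons]
            · cases ps with
              | nil =>
                  simp [hfind, pvLensAt_nil_path, pvLensAt_cons_some t pc [] ch hfind,
                    List.cons_prefix_cons]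
              | cons a b =>
                  have hlem : pvLensAt ((ch.1 ++ [L], ch.2.1, ch.2.2) : PvNode) (a :: b)
                      = pvLensAt ch (a :: b) := by
                    rw [pvLensAt_cons, pvLensAt_cons]
                  simp [hfind, hlem, pvLensAt_cons_some t pc (a :: b) ch hfind,
                    List.cons_prefix_cons]
          · have hnp : ¬ (pc :: ps <+: wc :: ws) := by
              simp [List.cons_prefix_cons, hc]
            rw [hadd, pvLensAt_cons]
            have hfs : ∀ u : PvNode, pvFind (pvSet t.2.2 wc u) pc = pvFind t.2.2 pc :=
              fun u => pvFind_pvSet_ne t.2.2 wc pc u hc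
            rw [hfs, ← pvLensAt_cons]
            simp [hnp]

-- the trie built by folding pvAdd over the word list
theorem pvLensAt_foldl (p : List Char) (hp : p ≠ []) (f : String → List Char) :
    ∀ (ws : List String) (t : PvNode),
    pvLensAt (ws.foldl (fun t w => pvAdd t (f w) (PySem.Str.len w)) t) p
      = pvLensAt t p ++ (ws.filter (fun w => decide (p <+: f w))).map PySem.Str.len := by
  intro ws
  induction ws with
  | nil =>
      intro t
      simp only [List.foldl_nil, List.filter_nil, List.map_nil, List.append_nil]
  | cons w rest ih =>
      intro t
      simp only [List.foldl_cons, ih, pvLensAt_pvAdd p (f w) t, List.filter_cons]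
      by_cases h : p <+: f w <;> simp [h, hp]

-- A's search characterised through pvLensAt
theorem pvSearch_eq_count (q : List Char) : ∀ (t : PvNode) (L : Int), '?' ∈ q →
    pvSearch t q L = (PySem.List.count (pvLensAt t (q.takeWhile (· ≠ '?'))) L : Int) := by
  induction q with
  | nil => intro t L h; simp at h
  | cons c cs ih =>
      intro t L h
      by_cases hc : c = '?'
      · subst hc; simp [pvSearch, List.takeWhile, pvLensAt]
      · have hcs : '?' ∈ cs := by
          rcases List.mem_cons.mp h with h1 | h1
          · exact absurd h1.symm hc
          · exact h1
        simp only [pvSearch, hc, if_false, List.takeWhile_cons]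
        rcases hfind : pvFind t.2.2 c with _ | ch
        · dsimp only
          rw [if_pos (show decide (c ≠ '?') = true by simp [hc]),
              pvLensAt_cons_none t c _ hfind]
          simp [PySem.List.count]
        · dsimp only
          rw [if_pos (show decide (c ≠ '?') = true by simp [hc]),
              pvLensAt_cons_some t c _ ch hfind]
          exact ih ch L hcs

theorem pvSearch_no_wild (q : List Char) : ∀ (t : PvNode) (L : Int), '?' ∉ q →
    pvSearch t q L = 0 := by
  induction q with
  | nil => intro t L _; simp [pvSearch]
  | cons c cs ih =>
      intro t L h
      have hc : ¬ c = '?' := fun hh => h (by simp [hh])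
      simp only [pvSearch, hc, if_false]
      rcases pvFind t.2.2 c with _ | ch
      · rfl
      · exact ih ch L (fun hh => h (List.mem_cons_of_mem _ hh))

-- counting through filter+map equals a countP over words
theorem count_map_filter (ws : List String) (P : String → Bool) (L : Int) :
    PySem.List.count ((ws.filter P).map PySem.Str.len) L
      = ws.countP (fun w => decide (PySem.Str.len w = L) && P w) := by
  rw [PySem.List.count_eq, List.count_eq_countP, List.countP_map, List.countP_filter]
  apply List.countP_congr
  intro w _
  simp only [Function.comp_apply, Bool.beq_eq_decide_eq]

-- the triple foldl of A splits into three independent folds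
theorem pv_foldl_triple (ws : List String) :
    ∀ (t1 t2 : PvNode) (l : List Int),
    ws.foldl (fun (st : PvNode × PvNode × List Int) word =>
      (pvAdd st.1 word.toList (PySem.Str.len word),
       pvAdd st.2.1 word.toList.reverse (PySem.Str.len word),
       st.2.2 ++ [PySem.Str.len word])) (t1, t2, l)
    = (ws.foldl (fun t w => pvAdd t w.toList (PySem.Str.len w)) t1,
       ws.foldl (fun t w => pvAdd t w.toList.reverse (PySem.Str.len w)) t2,
       l ++ ws.map PySem.Str.len) := by
  induction ws with
  | nil => intro t1 t2 l; simp
  | cons w rest ih =>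
      intro t1 t2 l
      simp only [List.foldl_cons, List.map_cons]
      rw [ih]
      simp

theorem pv_isIn_singleton (c : Char) (l : List Char) :
    PySem.Chars.isIn [c] l = true ↔ c ∈ l := by
  rw [PySem.Chars.isIn_iff_infix]
  constructor
  · rintro ⟨pre, suf, h⟩
    subst h; simp
  · intro h
    rcases List.append_of_mem h with ⟨pre, suf, h⟩
    exact ⟨pre, suf, by simp [h]⟩

-- search on the built trie as a countP over words ('?' in q, first char of q not '?')
theorem pv_search_built (ws : List String) (f : String → List Char)
    (qc : List Char) (c0 : Char) (rest : List Char) (L : Int)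
    (hqc : qc = c0 :: rest) (hc0 : c0 ≠ '?') (hw : '?' ∈ qc) :
    pvSearch (ws.foldl (fun t w => pvAdd t (f w) (PySem.Str.len w)) (([], false, PvKids.nil) : PvNode)) qc L
      = ws.countP (fun w => decide (PySem.Str.len w = L)
          && decide (qc.takeWhile (· ≠ '?') <+: f w)) := by
  have hp : qc.takeWhile (· ≠ '?') ≠ [] := by
    subst hqc; simp [List.takeWhile_cons, hc0]
  rw [pvSearch_eq_count qc _ _ hw,
      pvLensAt_foldl _ hp f ws _,
      pvLensAt_empty, List.nil_append, count_map_filter]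

-- per-query agreement of the two loop bodies
theorem pv_count_all (ws : List String) (L : Int) :
    (PySem.List.count (ws.map PySem.Str.len) L : Nat)
      = ws.countP (fun w => decide (PySem.Str.len w = L)) := by
  rw [PySem.List.count_eq, List.count_eq_countP, List.countP_map]
  apply List.countP_congr
  intro w _
  simp only [Function.comp_apply, Bool.beq_eq_decide_eq]

theorem pv_query (ws : List String) (q : String) (hq : q ≠ "") :
    (match q.toList with
      | [] => (0 : Int)
      | c0 :: _ =>
          if c0 = '?' then
            if q.toList.getLast? = some '?'
            then (PySem.List.count (ws.map PySem.Str.len) (PySem.Str.len q) : Int)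
            else pvSearch (ws.foldl (fun t w => pvAdd t w.toList.reverse (PySem.Str.len w)) (([], false, PvKids.nil) : PvNode)) q.toList.reverse (PySem.Str.len q)
          else pvSearch (ws.foldl (fun t w => pvAdd t w.toList (PySem.Str.len w)) (([], false, PvKids.nil) : PvNode)) q.toList (PySem.Str.len q))
    = (if PySem.Chars.isIn ['?'] q.toList = false then (0 : Int)
       else if q.toList.head? = some '?' then
         ws.foldl (fun acc w =>
           if PySem.Str.len w = PySem.Str.len q
              ∧ PySem.Chars.endswith w.toList ((q.toList.reverse.takeWhile (· ≠ '?')).reverse) = true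
           then acc + 1 else acc) (0 : Int)
       else
         ws.foldl (fun acc w =>
           if PySem.Str.len w = PySem.Str.len q
              ∧ PySem.Chars.startswith w.toList (q.toList.takeWhile (· ≠ '?')) = true
           then acc + 1 else acc) (0 : Int)) := by
  rcases hqc : q.toList with _ | ⟨c0, rest⟩
  · exact absurd (String.toList_eq_nil_iff.mp hqc) hq
  · dsimp only [List.head?]
    by_cases hw : '?' ∈ (c0 :: rest)
    · have hIn : PySem.Chars.isIn ['?'] (c0 :: rest) = true := (pv_isIn_singleton _ _).mpr hw
      rw [if_neg (show ¬ PySem.Chars.isIn ['?'] (c0 :: rest) = false by simp [hIn])]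
      by_cases hc0 : c0 = '?'
      · subst hc0
        rw [if_pos (show ('?' : Char) = '?' from rfl),
            if_pos (show (some '?' : Option Char) = some '?' from rfl),
            PySem.List.foldl_ite_add_one
              (fun w => PySem.Str.len w = PySem.Str.len q
                ∧ PySem.Chars.endswith w.toList ((('?' :: rest).reverse.takeWhile (· ≠ '?')).reverse) = true) ws 0,
            zero_add]
        by_cases hlast : ('?' :: rest : List Char).getLast? = some '?'
        · -- both ends are '?': every word of the query's length matches
          rw [if_pos hlast]
          have hrev : ('?' :: rest : List Char).reverse.takeWhile (· ≠ '?') = [] := by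
            have h1 : ('?' :: rest : List Char).reverse.head? = some '?' := by
              rw [List.head?_reverse]; exact hlast
            rcases hr : ('?' :: rest : List Char).reverse with _ | ⟨d, ds⟩
            · rfl
            · rw [hr] at h1
              have hd2 : d = '?' := by simpa using h1
              subst hd2
              simp [List.takeWhile_cons]
          rw [show ((PySem.List.count (ws.map PySem.Str.len) (PySem.Str.len q) : Nat) : Int)
              = (ws.countP (fun w => decide (PySem.Str.len w = PySem.Str.len q)) : Int) from by
            rw [pv_count_all]]
          congr 1
          apply List.countP_congr
          intro w _
          rw [hrev]
          simp [PySem.Chars.endswith_iff]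
        · -- '?…x': the reversed trie counts words with the fixed suffix
          rw [if_neg hlast]
          rcases hr : ('?' :: rest : List Char).reverse with _ | ⟨d, ds⟩
          · exact absurd (by simpa using congrArg List.reverse hr) (List.cons_ne_nil '?' rest)
          · have hd : d ≠ '?' := by
              intro hdq; subst hdq
              exact hlast (by rw [← List.head?_reverse, hr]; rfl)
            have hwr : '?' ∈ (d :: ds : List Char) := hr ▸ List.mem_reverse.mpr hw
            rw [pv_search_built ws (fun w => w.toList.reverse) (d :: ds) d ds
                (PySem.Str.len q) rfl hd hwr]
            congr 1
            apply List.countP_congr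
            intro w _
            have hiff : PySem.Chars.endswith w.toList (((d :: ds : List Char).takeWhile (· ≠ '?')).reverse) = true
                ↔ (d :: ds : List Char).takeWhile (· ≠ '?') <+: w.toList.reverse := by
              rw [PySem.Chars.endswith_iff]
              constructor
              · intro h
                have h2 := List.reverse_prefix.mpr h
                simpa using h2
              · intro h
                have h2 : ((d :: ds : List Char).takeWhile (· ≠ '?')).reverse.reverse <+: w.toList.reverse := by
                  simpa using h
                exact List.reverse_prefix.mp h2
            simp only [ne_eq, decide_not] at hiff
            simp [hiff]
      · -- forward: the plain trie counts words with the fixed prefix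
        rw [if_neg hc0, if_neg (show ¬ (some c0 : Option Char) = some '?' by simpa using hc0),
            pv_search_built ws (fun w => w.toList) (c0 :: rest) c0 rest (PySem.Str.len q) rfl hc0 hw,
            PySem.List.foldl_ite_add_one
              (fun w => PySem.Str.len w = PySem.Str.len q
                ∧ PySem.Chars.startswith w.toList ((c0 :: rest : List Char).takeWhile (· ≠ '?')) = true) ws 0,
            zero_add]
        congr 1
        apply List.countP_congr
        intro w _
        simp [PySem.Chars.startswith_iff]
    · -- no wildcard: both programs return 0
      have hIn : PySem.Chars.isIn ['?'] (c0 :: rest) = false := by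
        rcases h : PySem.Chars.isIn ['?'] (c0 :: rest) with _ | _
        · rfl
        · exact absurd ((pv_isIn_singleton _ _).mp h) hw
      rw [if_pos hIn]
      have hc0 : ¬ c0 = '?' := fun h => hw (h ▸ List.mem_cons_self)
      rw [if_neg hc0]
      exact pvSearch_no_wild (c0 :: rest) _ _ hw

-- ===== VERDICT (by name: the statement is the Claim_ definition above) =====
theorem solution_spec : Claim_equal_solution := by
  intro words queries _ hpre
  unfold Spec_solution solution solution_alt
  rw [pv_foldl_triple]
  simp only [List.nil_append]
  rw [PySem.List.foldl_append_singleton_eq_map, PySem.List.foldl_append_singleton_eq_map,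
      List.nil_append, List.nil_append]
  apply List.map_congr_left
  intro q hqmem
  exact pv_query words q (fun hq => hpre (hq ▸ hqmem))
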